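-- pv_equiv track=rewrite | github.com/arthurmlima/logmap | Digital_Map_Generator.py | generate_chunk2_arrays
-- ===== SOURCE A (Python) =====
-- def generate_chunk2_arrays(k):
--     '''
--
--     Parameters
--     ----------
--     k : Number of digits in a binary number
--
--     Returns
--     -------
--     chunk2_array : List containing all (2, i, j) operators
--     '''
--
--     C = 2 * k - 2
--     chunk2_array = [None] * C
--     chunk2_array[0], chunk2_array[1] = [], []
--     chunk2_array[2], chunk2_array[3] = [], [] # placeholder for empty first column
--
--     for cl in range(4, C):
--         col = []
--
--         # Case 1 - Col(4) to Col(k)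
--         if cl <= k:
--             base_i, base_j = k - cl + 1, k
--
--         # Case 2 - Col(k) to Col(C - 1)
--         else:
--             base_i, base_j = 1, 2*k - cl
--
--         n = 0
--         for n in range (0, k):
--             i = base_i + n
--             j = base_j - n
--             if i >= j:
--                 break
--             else:
--                 col.append((2, i, j))
--
--         # Creating full array
--         chunk2_array[cl] = col if col else []
--
--     return chunk2_array
-- ===== SOURCE B (Python) =====
-- def generate_chunk2_arrays(k):
--     '''Anti-diagonal bucketing in two stages: every operator (2, i, j) with
--     1 <= i < j <= k belongs to column cl = 2*k + 1 - (i + j), so stage one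
--     sweeps the pair grid once distributing the i-indices into per-column
--     buckets, and stage two materializes each column's (2, i, j) tuples from
--     its bucket (j is determined by the column: j = 2*k + 1 - cl - i).'''
--     if k < 3:
--         # natural domain: the layout needs the four leading placeholder columns,
--         # i.e. 2*k - 2 >= 4 (A fails on smaller k too, with an IndexError)
--         raise ValueError("k must be at least 3")
--     C = 2 * k - 2
--     buckets = [[] for _ in range(C)]
--     for i in range(1, k):
--         # cl = 2*k+1-i-j lies in [4, C) exactly for j in [max(i+1, 4-i), min(k, 2*k-3-i)]
--         s0 = 2 * k + 1 - i
--         for j in range(max(i + 1, 4 - i), min(k, 2 * k - 3 - i) + 1):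
--             buckets[s0 - j].append(i)
--     return [[(2, i, 2 * k + 1 - cl - i) for i in b] for cl, b in enumerate(buckets)]
-- ===== Notes on version B (the rewrite author's own statement) =====
-- stated objective: alternative
-- what changed: B replaces A's per-column construction (compute base_i/base_j per column, then an inner break-loop) by two staged passes: an anti-diagonal bucketing sweep of the pair grid 1<=i<j<=k that distributes each i into the bucket of column cl = 2*k+1-(i+j), then a materialization pass building each column's (2,i,j) tuples from its bucket (j = 2*k+1-cl-i); for k < 3 (outside the natural domain, where A dies with an IndexError) B raises ValueError.
import Mathlib
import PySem

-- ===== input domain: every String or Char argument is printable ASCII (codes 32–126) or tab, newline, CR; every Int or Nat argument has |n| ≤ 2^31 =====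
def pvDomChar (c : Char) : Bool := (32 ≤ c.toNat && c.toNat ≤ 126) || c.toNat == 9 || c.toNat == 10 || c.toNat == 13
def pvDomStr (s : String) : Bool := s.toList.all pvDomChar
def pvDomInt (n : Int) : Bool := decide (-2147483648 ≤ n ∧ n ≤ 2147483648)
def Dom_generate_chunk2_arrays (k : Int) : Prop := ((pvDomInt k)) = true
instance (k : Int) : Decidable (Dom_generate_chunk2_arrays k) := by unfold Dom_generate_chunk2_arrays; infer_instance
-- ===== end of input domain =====

-- B replaces A's per-column break-loops by one anti-diagonal bucketing pass over
-- the pair grid 1 ≤ i < j ≤ k (objective: alternative; same asymptotic cost).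

-- ===== PORT A =====
-- inner 'for n in range(0,k): … if i >= j: break else: col.append(…)'
def pvLoopA (bi bj : Int) : List Int → List (Int × Int × Int) → List (Int × Int × Int)
  | [], col => col
  | n :: ns, col =>
    let i := bi + n
    let j := bj - n
    if i ≥ j then col else pvLoopA bi bj ns (col ++ [(2, i, j)])

def pvColA (k cl : Int) : List (Int × Int × Int) :=
  let bij := if cl ≤ k then (k - cl + 1, k) else (1, 2 * k - cl)
  let col := pvLoopA bij.1 bij.2 (PySem.List.pyRange 0 k 1) []
  -- 'col if col else []'
  if col.isEmpty then [] else col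

def generate_chunk2_arrays (k : Int) : List (List (Int × Int × Int)) :=
  -- '[None]*C' (C = 2*k-2) with the four leading slots assigned '[]', then the loop
  -- assigns chunk2_array[cl] for cl in range(4, C); under Pre_ every slot is filled,
  -- so getD [] only serves the Lean return type
  ((PySem.List.pyRange 4 (2 * k - 2) 1).foldl
      (fun a cl => a.set cl.toNat (some (pvColA k cl)))
      (((((List.replicate (2 * k - 2).toNat (none : Option (List (Int × Int × Int)))).set 0
          (some [])).set 1 (some [])).set 2 (some [])).set 3 (some []))).map (fun o => o.getD [])

-- ===== PORT B =====
def generate_chunk2_arrays_alt (k : Int) : List (List (Int × Int × Int)) :=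
  -- 'if k < 3: raise ValueError' — outside Pre_; the port returns [] there.
  -- Stage one: 'buckets = [[] for _ in range(C)]' and the double loop appends i to
  -- bucket cl = s0 - j = 2*k+1-i-j, with j windowed so that cl lies in [4, C).
  -- Stage two: '[[(2, i, 2*k+1-cl-i) for i in b] for cl, b in enumerate(buckets)]'.
  if k < 3 then []
  else
    (PySem.List.enumerate
        ((PySem.List.pyRange 1 k 1).foldl
          (fun buckets i =>
            let s0 := 2 * k + 1 - i
            (PySem.List.pyRange (max (i + 1) (4 - i)) (min k (2 * k - 3 - i) + 1) 1).foldl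
              (fun buckets j => buckets.modify (s0 - j).toNat (fun c => c ++ [i]))
              buckets)
          (List.replicate (2 * k - 2).toNat ([] : List Int)))).map
      (fun p => p.2.map (fun i => (2, i, 2 * k + 1 - p.1 - i)))

-- ===== PRECONDITION & SPEC =====
-- Pre_ excludes exactly k ≤ 2, where A raises IndexError assigning the four leading
-- placeholder slots of its [None]*(2*k-2) array (B returns max(0, 2*k-2) empty columns there).
def Pre_generate_chunk2_arrays (k : Int) : Prop := 3 ≤ k
instance (k : Int) : Decidable (Pre_generate_chunk2_arrays k) := by
  unfold Pre_generate_chunk2_arrays; infer_instance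

def pvWitness_generate_chunk2_arrays : Int := 5

def Spec_generate_chunk2_arrays (k : Int) (out : List (List (Int × Int × Int))) : Prop :=
  out = generate_chunk2_arrays_alt k
instance (k : Int) (out : List (List (Int × Int × Int))) : Decidable (Spec_generate_chunk2_arrays k out) := by
  unfold Spec_generate_chunk2_arrays; infer_instance

-- ===== CLAIM (what is proved, stated in full; the proofs are below) =====
def Claim_equal_generate_chunk2_arrays : Prop :=
  ∀ (k : Int), Dom_generate_chunk2_arrays k → Pre_generate_chunk2_arrays k →
    Spec_generate_chunk2_arrays k (generate_chunk2_arrays k)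

-- ===== LEMMAS AND PROOFS =====

-- A's break-loop is takeWhile of the continuation condition.
theorem pvLoopA_eq_takeWhile (bi bj : Int) (l : List Int) (acc : List (Int × Int × Int)) :
    pvLoopA bi bj l acc
      = acc ++ (l.takeWhile (fun n => decide (bi + n < bj - n))).map
          (fun n => (2, bi + n, bj - n)) := by
  induction l generalizing acc with
  | nil => simp [pvLoopA]
  | cons n ns ih =>
    simp only [pvLoopA, List.takeWhile_cons]
    by_cases h : bi + n ≥ bj - n
    · simp [h, not_lt.mpr h]
    · have h' : bi + n < bj - n := lt_of_not_ge h
      simp [h, h', ih]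

-- takeWhile (· < t) on an ascending integer range is the truncated range.
theorem takeWhile_lt_pyRange (t : Int) : ∀ (c : Nat) (a b : Int), (b - a).toNat = c →
    (PySem.List.pyRange a b 1).takeWhile (fun n => decide (n < t))
      = PySem.List.pyRange a (min b (max a t)) 1 := by
  intro c
  induction c with
  | zero =>
    intro a b hc
    have h1 : (b - a).toNat = 0 := by omega
    have h2 : ((min b (max a t)) - a).toNat = 0 := by omega
    rw [PySem.List.pyRange_one, PySem.List.pyRange_one, h1, h2]
    simp
  | succ c ih =>
    intro a b hc
    have hab : a < b := by omega
    rw [PySem.List.pyRange_one_cons hab]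
    by_cases ht : a < t
    · have h2 : a < min b (max a t) := by omega
      rw [PySem.List.pyRange_one_cons h2]
      have hmax : max (a + 1) t = t := by omega
      have hmax0 : max a t = t := by omega
      simp only [List.takeWhile_cons, decide_eq_true ht]
      rw [ih (a + 1) b (by omega), hmax, hmax0]
      simp
    · have h2 : ((min b (max a t)) - a).toNat = 0 := by omega
      rw [PySem.List.pyRange_one (a := a) (b := min b (max a t)), h2]
      simp [ht]

-- closed form of A's column: a mapped truncated range
theorem pvColA_closed (k cl bi bj : Int)
    (h : (if cl ≤ k then (k - cl + 1, k) else (1, 2 * k - cl)) = (bi, bj)) :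
    pvColA k cl
      = (PySem.List.pyRange 0 (min k (max 0 (PySem.Int.floordiv (bj - bi + 1) 2))) 1).map
          (fun n => (2, bi + n, bj - n)) := by
  have hpred : (fun n => decide (bi + n < bj - n))
      = (fun n => decide (n < PySem.Int.floordiv (bj - bi + 1) 2)) := by
    funext n
    have he := PySem.Int.floordiv_eq_ediv_of_pos (a := bj - bi + 1) (b := 2) (by omega)
    rw [he, decide_eq_decide]
    omega
  simp only [pvColA, h]
  rw [pvLoopA_eq_takeWhile, hpred,
      takeWhile_lt_pyRange _ ((k - 0).toNat) 0 k (by ring_nf)]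
  simp only [List.nil_append]
  split_ifs with hE
  · exact (List.isEmpty_iff.mp hE).symm
  · rfl

-- A's set-fold over a prefix+None-suffix array fills the suffix in order.
theorem foldl_set_pyRange (g : Int → List (Int × Int × Int)) :
    ∀ (c : Nat) (m C : Int) (pre suf : List (Option (List (Int × Int × Int)))),
      0 ≤ m → (C - m).toNat = c → pre.length = m.toNat → suf.length = c →
      (PySem.List.pyRange m C 1).foldl (fun a cl => a.set cl.toNat (some (g cl))) (pre ++ suf)
        = pre ++ (PySem.List.pyRange m C 1).map (fun cl => some (g cl)) := by
  intro c
  induction c with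
  | zero =>
    intro m C pre suf hm hc hpre hsuf
    rw [PySem.List.pyRange_one, hc]
    have : suf = [] := List.eq_nil_of_length_eq_zero hsuf
    simp [this]
  | succ c ih =>
    intro m C pre suf hm hc hpre hsuf
    have hmC : m < C := by omega
    rw [PySem.List.pyRange_one_cons hmC]
    obtain ⟨s0, suf', rfl⟩ : ∃ s0 suf', suf = s0 :: suf' := by
      cases suf with
      | nil => simp at hsuf
      | cons s0 suf' => exact ⟨s0, suf', rfl⟩
    simp only [List.foldl_cons, List.map_cons]
    have hset : (pre ++ s0 :: suf').set m.toNat (some (g m))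
        = (pre ++ [some (g m)]) ++ suf' := by
      rw [List.set_append]
      simp [hpre]
    have hsuf' : suf'.length = c := by simp at hsuf; omega
    rw [hset, ih (m + 1) C (pre ++ [some (g m)]) suf' (by omega) (by omega)
          (by simp [hpre]; omega) hsuf']
    simp

-- the initial array is four filled slots followed by Nones
theorem init_arr_eq (C : Int) (h : 4 ≤ C) :
    ((((List.replicate C.toNat (none : Option (List (Int × Int × Int)))).set 0 (some [])).set 1
        (some [])).set 2 (some [])).set 3 (some [])
      = [some [], some [], some [], some []] ++ List.replicate (C - 4).toNat none := by
  have hC : C.toNat = 4 + (C - 4).toNat := by omega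
  rw [hC, List.replicate_add]
  rfl

-- A as a prefix ++ mapped range
theorem A_shape (k : Int) (hk : 3 ≤ k) :
    generate_chunk2_arrays k
      = [[], [], [], []] ++ (PySem.List.pyRange 4 (2 * k - 2) 1).map (pvColA k) := by
  unfold generate_chunk2_arrays
  have h4 : (4 : Int) ≤ 2 * k - 2 := by omega
  rw [init_arr_eq (2 * k - 2) h4,
      foldl_set_pyRange (pvColA k) ((2 * k - 2 - 4).toNat) 4 (2 * k - 2)
        [some [], some [], some [], some []] (List.replicate (2 * k - 2 - 4).toNat none)
        (by omega) rfl (by decide) (by simp)]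
  simp

-- B's bucketing fold, bucket by bucket: index m collects, in traversal order,
-- the values of the pairs whose target column is m (all targets are nonnegative here).
theorem foldl_modify_getElem? {α : Type} (L : List (Int × Int)) (m : Nat)
    (tgt : Int × Int → Int) (v : Int × Int → α)
    (hL : ∀ p ∈ L, 0 ≤ tgt p) :
    ∀ (init : List (List α)),
    (L.foldl (fun cols p => cols.modify (tgt p).toNat (fun c => c ++ [v p])) init)[m]?
      = init[m]?.map (fun c => c ++ (L.filter (fun p => decide (tgt p = (m : Int)))).map v) := by
  induction L with
  | nil => intro init; cases h : init[m]? <;> simp [h]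
  | cons p L ih =>
    intro init
    simp only [List.foldl_cons, List.filter_cons]
    have hp0 : 0 ≤ tgt p := hL p (by simp)
    rw [ih (fun q hq => hL q (by simp [hq])), List.getElem?_modify]
    by_cases hm : tgt p = (m : Int)
    · have hdec : decide (tgt p = (m : Int)) = true := by simp [hm]
      have htn : (tgt p).toNat = m := by omega
      rw [hdec]
      cases h : init[m]? <;> simp [htn]
    · have hdec : decide (tgt p = (m : Int)) = false := by simp [hm]
      have htn : (tgt p).toNat ≠ m := by omega
      rw [hdec]
      cases h : init[m]? <;> simp [htn]

-- indexing into enumerate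
theorem enumerate_getElem? {α : Type} :
    ∀ (xs : List α) (s : Int) (m : Nat),
      (PySem.List.enumerate xs s)[m]? = xs[m]?.map (fun x => (s + (m : Int), x)) := by
  intro xs
  induction xs with
  | nil => intro s m; simp [PySem.List.enumerate_nil]
  | cons x xs ih =>
    intro s m
    rw [PySem.List.enumerate_cons]
    cases m with
    | zero => simp
    | succ m =>
      simp only [List.getElem?_cons_succ, ih (s + 1) m]
      cases xs[m]?
      · simp
      · simp
        omega

-- a range filtered by a single value
theorem filter_eq_pyRange (v : Int) : ∀ (c : Nat) (a b : Int), (b - a).toNat = c →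
    (PySem.List.pyRange a b 1).filter (fun j => decide (j = v))
      = if a ≤ v ∧ v < b then [v] else [] := by
  intro c
  induction c with
  | zero =>
    intro a b hc
    rw [PySem.List.pyRange_one_eq_nil (by omega)]
    rw [if_neg (by omega)]
    rfl
  | succ c ih =>
    intro a b hc
    have hab : a < b := by omega
    rw [PySem.List.pyRange_one_cons hab, List.filter_cons, ih (a + 1) b (by omega)]
    by_cases hv : a = v
    · subst hv
      rw [if_neg (by omega : ¬(a + 1 ≤ a ∧ a < b)), if_pos (And.intro (le_refl a) hab)]
      simp
    · have hd : decide (a = v) = false := by simp [hv]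
      rw [hd]
      simp only [Bool.false_eq_true, if_false]
      by_cases h2 : a + 1 ≤ v ∧ v < b
      · rw [if_pos h2, if_pos (by omega)]
      · rw [if_neg h2, if_neg (by omega)]

-- a range filtered by an interval
theorem filter_interval_pyRange (c d : Int) : ∀ (n : Nat) (a b : Int), (b - a).toNat = n →
    (PySem.List.pyRange a b 1).filter (fun i => decide (c ≤ i ∧ i < d))
      = PySem.List.pyRange (max a c) (min b d) 1 := by
  intro n
  induction n with
  | zero =>
    intro a b hn
    rw [PySem.List.pyRange_one_eq_nil (by omega), PySem.List.pyRange_one_eq_nil (by omega)]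
    rfl
  | succ n ih =>
    intro a b hn
    have hab : a < b := by omega
    rw [PySem.List.pyRange_one_cons hab, List.filter_cons, ih (a + 1) b (by omega)]
    by_cases hin : c ≤ a ∧ a < d
    · have hd : decide (c ≤ a ∧ a < d) = true := by
        simp only [decide_eq_true_eq]
        exact hin
      rw [hd, if_pos rfl]
      have h1 : max a c = a := by omega
      have h2 : max (a + 1) c = a + 1 := by omega
      rw [h1, h2, PySem.List.pyRange_one_cons (by omega : a < min b d)]
    · have hd : decide (c ≤ a ∧ a < d) = false := by
        simp only [decide_eq_false_iff_not]
        exact hin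
      rw [hd]
      simp only [Bool.false_eq_true, if_false]
      by_cases hc2 : a < c
      · have : max a c = max (a + 1) c := by omega
        rw [this]
      · have hda : d ≤ a := by omega
        rw [PySem.List.pyRange_one_eq_nil (by omega), PySem.List.pyRange_one_eq_nil (by omega)]

-- flatMap of conditional singletons is filter-then-map
theorem flatMap_ite_singleton {α β : Type} (l : List α) (c : α → Prop) [DecidablePred c]
    (g : α → β) :
    l.flatMap (fun x => if c x then [g x] else [])
      = (l.filter (fun x => decide (c x))).map g := by
  induction l with
  | nil => rfl
  | cons x l ih =>
    simp only [List.flatMap_cons, List.filter_cons]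
    by_cases h : c x <;> simp [h, ih]

-- a mapped range equals its 0-based shifted form
theorem pyRange_map_shift {α : Type} {a b c : Int} {f g : Int → α}
    (hlen : b - a = c) (hfg : ∀ n : Int, 0 ≤ n → n < c → f (a + n) = g (0 + n)) :
    (PySem.List.pyRange a b 1).map f = (PySem.List.pyRange 0 c 1).map g := by
  apply List.ext_getElem?
  intro n
  rw [List.getElem?_map, List.getElem?_map, PySem.List.getElem?_pyRange_one,
      PySem.List.getElem?_pyRange_one]
  by_cases h : n < (c - 0).toNat
  · rw [if_pos (by omega), if_pos h]
    simp only [Option.map_some]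
    rw [hfg n (by omega) (by omega)]
  · rw [if_neg (by omega), if_neg h]
    rfl

-- the per-column equality: the tuples bucketed into column m are exactly A's column m
theorem bucket_eq_colA (k : Int) (m : Nat) (hk : 3 ≤ k)
    (hm4 : 4 ≤ (m : Int)) (hmC : (m : Int) < 2 * k - 2) :
    ((((PySem.List.pyRange 1 k 1).flatMap
          (fun i => (PySem.List.pyRange (max (i + 1) (4 - i)) (min k (2 * k - 3 - i) + 1) 1).map
            (fun j => (i, j)))).filter
        (fun p => decide (2 * k + 1 - p.1 - p.2 = (m : Int)))).map (fun p => p.1)).map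
        (fun i => (2, i, 2 * k + 1 - (m : Int) - i))
      = pvColA k (m : Int) := by
  obtain ⟨s, hs⟩ : ∃ s : Int, s = 2 * k + 1 - (m : Int) := ⟨_, rfl⟩
  -- simplify the filter predicate to "the pair sum is s"
  have hpred : (fun p : Int × Int => decide (2 * k + 1 - p.1 - p.2 = (m : Int)))
      = (fun p : Int × Int => decide (p.1 + p.2 = s)) := by
    funext p
    rw [decide_eq_decide]
    omega
  rw [hpred, List.filter_flatMap]
  have hinner : ∀ i : Int,
      ((PySem.List.pyRange (max (i + 1) (4 - i)) (min k (2 * k - 3 - i) + 1) 1).map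
          (fun j => (i, j))).filter (fun p => decide (p.1 + p.2 = s))
        = if max (i + 1) (4 - i) ≤ s - i ∧ s - i < min k (2 * k - 3 - i) + 1 then [(i, s - i)]
          else [] := by
    intro i
    rw [List.filter_map]
    have hp : ((fun p : Int × Int => decide (p.1 + p.2 = s)) ∘ (fun j => (i, j)))
        = (fun j => decide (j = s - i)) := by
      funext j
      simp only [Function.comp]
      rw [decide_eq_decide]
      omega
    rw [hp, filter_eq_pyRange (s - i) ((min k (2 * k - 3 - i) + 1 - max (i + 1) (4 - i)).toNat)
          (max (i + 1) (4 - i)) (min k (2 * k - 3 - i) + 1) rfl]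
    split_ifs <;> simp
  have hflat : (PySem.List.pyRange 1 k 1).flatMap
        (fun i => ((PySem.List.pyRange (max (i + 1) (4 - i)) (min k (2 * k - 3 - i) + 1) 1).map
          (fun j => (i, j))).filter (fun p => decide (p.1 + p.2 = s)))
      = ((PySem.List.pyRange 1 k 1).filter
          (fun i => decide (max (i + 1) (4 - i) ≤ s - i ∧ s - i < min k (2 * k - 3 - i) + 1))).map
          (fun i => (i, s - i)) := by
    rw [← flatMap_ite_singleton (PySem.List.pyRange 1 k 1)
        (fun i => max (i + 1) (4 - i) ≤ s - i ∧ s - i < min k (2 * k - 3 - i) + 1)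
        (fun i => (i, s - i))]
    exact List.flatMap_congr (fun i _ => hinner i)
  rw [hflat]
  -- the window condition is the interval [s-k, (s+1)/2)
  have hp2 : (fun i : Int => decide (max (i + 1) (4 - i) ≤ s - i ∧
        s - i < min k (2 * k - 3 - i) + 1))
      = (fun i : Int => decide (s - k ≤ i ∧ i < (s + 1) / 2)) := by
    funext i
    rw [decide_eq_decide]
    omega
  rw [hp2, filter_interval_pyRange (s - k) ((s + 1) / 2) ((k - 1).toNat) 1 k rfl]
  simp only [List.map_map]
  -- compare with A's closed-form column, case by case on m ≤ k
  by_cases hcase : (m : Int) ≤ k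
  · rw [pvColA_closed k (m : Int) (k - (m : Int) + 1) k (by rw [if_pos hcase])]
    have hdv := PySem.Int.floordiv_eq_ediv_of_pos
      (a := k - (k - (m : Int) + 1) + 1) (b := 2) (by omega)
    rw [hdv]
    apply pyRange_map_shift
    · omega
    · intro n hn0 hnc
      have e1 : max 1 (s - k) + n = k - (m : Int) + 1 + (0 + n) := by omega
      simp [Function.comp, e1]
      all_goals omega
  · rw [pvColA_closed k (m : Int) 1 (2 * k - (m : Int)) (by rw [if_neg hcase])]
    have hdv := PySem.Int.floordiv_eq_ediv_of_pos
      (a := 2 * k - (m : Int) - 1 + 1) (b := 2) (by omega)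
    rw [hdv]
    apply pyRange_map_shift
    · omega
    · intro n hn0 hnc
      have e1 : max 1 (s - k) + n = 1 + (0 + n) := by omega
      simp [Function.comp, e1]
      all_goals omega

-- ===== VERDICT (by name: the statement is the Claim_ definition above) =====
theorem generate_chunk2_arrays_spec : Claim_equal_generate_chunk2_arrays := by
  intro k _ hk
  unfold Pre_generate_chunk2_arrays at hk
  unfold Spec_generate_chunk2_arrays
  -- B's nested stage-one fold is a single fold over the flattened windowed pair grid
  have hB : generate_chunk2_arrays_alt k
      = (PySem.List.enumerate
          (((PySem.List.pyRange 1 k 1).flatMap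
              (fun i => (PySem.List.pyRange (max (i + 1) (4 - i)) (min k (2 * k - 3 - i) + 1) 1).map
                (fun j => (i, j)))).foldl
            (fun buckets p => buckets.modify (2 * k + 1 - p.1 - p.2).toNat (fun c => c ++ [p.1]))
            (List.replicate (2 * k - 2).toNat ([] : List Int)))).map
        (fun p => p.2.map (fun i => (2, i, 2 * k + 1 - p.1 - i))) := by
    unfold generate_chunk2_arrays_alt
    rw [if_neg (by omega : ¬ k < 3), List.foldl_flatMap]
    congr 2
    congr 1
    funext buckets i
    rw [List.foldl_map]
  -- every windowed pair targets a real column: 4 ≤ cl < 2*k-2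
  have hmem : ∀ p ∈ (PySem.List.pyRange 1 k 1).flatMap
        (fun i => (PySem.List.pyRange (max (i + 1) (4 - i)) (min k (2 * k - 3 - i) + 1) 1).map
          (fun j => (i, j))),
      4 ≤ 2 * k + 1 - p.1 - p.2 ∧ 2 * k + 1 - p.1 - p.2 < 2 * k - 2 := by
    intro p hp
    obtain ⟨i, hi, hpi⟩ := List.mem_flatMap.mp hp
    obtain ⟨j, hj, rfl⟩ := List.mem_map.mp hpi
    rw [PySem.List.mem_pyRange_one] at hj
    simp only
    omega
  rw [A_shape k hk, hB]
  apply List.ext_getElem?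
  intro m
  rw [List.getElem?_map, enumerate_getElem?,
      foldl_modify_getElem? _ m (fun p => 2 * k + 1 - p.1 - p.2) (fun p => p.1)
        (fun p hp => by have h := hmem p hp; show (0 : Int) ≤ 2 * k + 1 - p.1 - p.2; omega)]
  by_cases hm : m < (2 * k - 2).toNat
  · rw [List.getElem?_replicate, if_pos hm]
    by_cases hm4 : m < 4
    · -- placeholder columns: the bucket stays empty
      have hfe : (((PySem.List.pyRange 1 k 1).flatMap
            (fun i => (PySem.List.pyRange (max (i + 1) (4 - i)) (min k (2 * k - 3 - i) + 1) 1).map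
              (fun j => (i, j)))).filter
          (fun p => decide (2 * k + 1 - p.1 - p.2 = (m : Int)))) = [] := by
        apply List.filter_eq_nil_iff.mpr
        intro p hp
        have := hmem p hp
        simp only [decide_eq_true_eq]
        omega
      rw [hfe]
      have hA : ([[], [], [], []] ++ (PySem.List.pyRange 4 (2 * k - 2) 1).map (pvColA k) :
          List (List (Int × Int × Int)))[m]? = some [] := by
        interval_cases m <;> rfl
      rw [hA]
      simp
    · -- real columns
      have hA : ([[], [], [], []] ++ (PySem.List.pyRange 4 (2 * k - 2) 1).map (pvColA k) :
          List (List (Int × Int × Int)))[m]? = some (pvColA k (m : Int)) := by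
        rw [List.getElem?_append_right (by simp; omega)]
        have hlen4 : ([[], [], [], []] : List (List (Int × Int × Int))).length = 4 := rfl
        rw [hlen4]
        simp only [List.getElem?_map, PySem.List.getElem?_pyRange_one]
        rw [if_pos (by omega)]
        simp only [Option.map_some]
        have hmm : (4 : Int) + ↑(m - 4) = (m : Int) := by omega
        rw [hmm]
      rw [hA, ← bucket_eq_colA k m hk (by omega) (by omega)]
      simp
  · rw [List.getElem?_replicate, if_neg hm]
    have hA : ([[], [], [], []] ++ (PySem.List.pyRange 4 (2 * k - 2) 1).map (pvColA k) :
        List (List (Int × Int × Int)))[m]? = none := by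
      apply List.getElem?_eq_none
      simp [PySem.List.length_pyRange_one]
      omega
    rw [hA]
    simp
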